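-- pv_equiv track=rewrite | github.com/TadejMohorcic/advent-of-code | 2015/2015-01.py | calculate_floor
-- ===== SOURCE A (Python) =====
-- def calculate_floor(string, part):
--     floor = 0
--
--     for i in range(len(string)):
--         if string[i] == ')':
--             floor -= 1
--             if part and floor < 0:
--                 return i + 1
--         else:
--             floor += 1
--
--     return floor
-- ===== SOURCE B (Python) =====
-- def calculate_floor(string, part):
--     # net floor via closed form; basement (if asked) via divide and conquer:
--     # a half contains the first basement iff the left half has one, else recurse
--     # right starting at start + net(left half).
--     total = len(string) - 2 * string.count(')')
--     if not part:
--         return total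
--
--     def first_basement(s, start, offset):
--         if not s:
--             return None
--         if len(s) == 1:
--             return offset + 1 if start + (-1 if s == ')' else 1) < 0 else None
--         mid = len(s) // 2
--         left = s[:mid]
--         hit = first_basement(left, start, offset)
--         if hit is not None:
--             return hit
--         return first_basement(s[mid:], start + len(left) - 2 * left.count(')'), offset + mid)
--
--     hit = first_basement(string, 0, 0)
--     return hit if hit is not None else total
-- ===== Notes on version B (the rewrite author's own statement) =====
-- stated objective: alternative
-- what changed: Net floor computed by the loop-free closed form len - 2*count(')'); the first-basement index (part truthy) found by divide and conquer on string halves, carrying each right half's start floor from the left half's closed-form net, instead of A's single indexed scan with a running counter.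
import Mathlib
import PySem

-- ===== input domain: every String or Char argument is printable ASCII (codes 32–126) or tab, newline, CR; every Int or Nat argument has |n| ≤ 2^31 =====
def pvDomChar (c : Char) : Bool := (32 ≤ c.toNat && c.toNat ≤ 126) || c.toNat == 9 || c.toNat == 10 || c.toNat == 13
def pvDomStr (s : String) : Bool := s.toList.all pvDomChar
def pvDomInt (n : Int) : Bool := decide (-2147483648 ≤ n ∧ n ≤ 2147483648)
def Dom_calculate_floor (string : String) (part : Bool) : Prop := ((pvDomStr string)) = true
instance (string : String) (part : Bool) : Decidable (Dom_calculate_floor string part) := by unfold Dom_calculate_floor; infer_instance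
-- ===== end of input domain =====

-- B computes the net floor by the closed form len - 2*count(')') and finds the first
-- basement index by divide and conquer on string halves (alternative decomposition, same task).


-- ===== PORT A =====
-- A's loop over range(len(string)): recursion over the remaining chars with the index i.
def calcFloorGoA : List Char → Int → Int → Bool → Int
  | [], floor, _, _ => floor
  | c :: rest, floor, i, part =>
    if c = ')' then
      if part = true ∧ floor - 1 < 0 then i + 1
      else calcFloorGoA rest (floor - 1) (i + 1) part
    else calcFloorGoA rest (floor + 1) (i + 1) part

def calculate_floor (string : String) (part : Bool) : Int :=
  calcFloorGoA string.toList 0 0 part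

-- ===== PORT B =====
-- closed form: len(s) - 2 * s.count(')')
def netOf (l : List Char) : Int :=
  (l.length : Int) - 2 * (l.countP (fun c => c = ')') : Int)

-- B's divide-and-conquer first_basement helper.
def firstBasement : List Char → Int → Int → Option Int
  | [], _, _ => none
  | [c], start, offset =>
    if start + (if c = ')' then -1 else 1) < 0 then some (offset + 1) else none
  | a :: b :: rest, start, offset =>
    let l := a :: b :: rest
    let mid := l.length / 2
    let left := l.take mid
    match firstBasement left start offset with
    | some k => some k
    | none => firstBasement (l.drop mid) (start + netOf left) (offset + (mid : Int))
termination_by l _ _ => l.length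
decreasing_by
  · simp; omega
  · simp; omega

def calculate_floor_alt (string : String) (part : Bool) : Int :=
  let total := netOf string.toList
  if part = false then total
  else
    match firstBasement string.toList 0 0 with
    | some k => k
    | none => total

-- ===== PRECONDITION & SPEC =====
def Spec_calculate_floor (string : String) (part : Bool) (out : Int) : Prop := out = calculate_floor_alt string part
instance (string : String) (part : Bool) (out : Int) : Decidable (Spec_calculate_floor string part out) := by unfold Spec_calculate_floor; infer_instance

-- ===== CLAIM (what is proved, stated in full; the proofs are below) =====
def Claim_equal_calculate_floor : Prop := ∀ (string : String) (part : Bool), Dom_calculate_floor string part → Spec_calculate_floor string part (calculate_floor string part)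

-- ===== LEMMAS AND PROOFS =====
-- reference left-to-right characterisation of the first basement index
def fbSpec : List Char → Int → Int → Option Int
  | [], _, _ => none
  | c :: rest, start, offset =>
    let f := start + (if c = ')' then -1 else 1)
    if f < 0 then some (offset + 1) else fbSpec rest f (offset + 1)

lemma netOf_cons (c : Char) (l : List Char) :
    netOf (c :: l) = (if c = ')' then -1 else 1) + netOf l := by
  by_cases h : c = ')' <;> simp [netOf, h, List.countP_cons] <;> push_cast <;> ring

lemma fbSpec_append (l₁ l₂ : List Char) : ∀ (s o : Int),
    fbSpec (l₁ ++ l₂) s o =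
      match fbSpec l₁ s o with
      | some k => some k
      | none => fbSpec l₂ (s + netOf l₁) (o + (l₁.length : Int)) := by
  induction l₁ with
  | nil => intro s o; simp [fbSpec, netOf]
  | cons c rest ih =>
    intro s o
    by_cases h : (s + (if c = ')' then -1 else 1)) < 0
    · simp [fbSpec, h]
    · simp only [List.cons_append, fbSpec, if_neg h, ih]
      have : s + (if c = ')' then -1 else 1) + netOf rest = s + netOf (c :: rest) := by
        rw [netOf_cons]; ring
      rw [this]
      have : o + 1 + (rest.length : Int) = o + ((c :: rest).length : Int) := by
        simp; push_cast; ring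
      rw [this]

lemma firstBasement_eq_fbSpec : ∀ (n : Nat) (l : List Char), l.length ≤ n →
    ∀ (s o : Int), firstBasement l s o = fbSpec l s o := by
  intro n
  induction n with
  | zero =>
    intro l hl s o
    have : l = [] := List.length_eq_zero_iff.mp (Nat.le_zero.mp hl)
    subst this; simp [firstBasement, fbSpec]
  | succ n ih =>
    intro l hl s o
    match l with
    | [] => simp [firstBasement, fbSpec]
    | [c] => simp [firstBasement, fbSpec]
    | a :: b :: rest =>
      rw [firstBasement]
      set L := a :: b :: rest with hL
      set mid := L.length / 2 with hmid
      have hmidlt : mid < L.length := by simp [hL, hmid]; omega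
      have hmidpos : 1 ≤ mid := by simp [hL, hmid]; omega
      have htake : (L.take mid).length = mid := by
        rw [List.length_take]; omega
      have hdrop : (L.drop mid).length = L.length - mid := by
        rw [List.length_drop]
      have h1 : firstBasement (L.take mid) s o = fbSpec (L.take mid) s o := by
        apply ih; omega
      have h2 : firstBasement (L.drop mid) (s + netOf (L.take mid)) (o + (mid : Int))
          = fbSpec (L.drop mid) (s + netOf (L.take mid)) (o + (mid : Int)) := by
        apply ih
        rw [hdrop]
        have := hl
        simp [hL] at this ⊢
        omega
      rw [h1, h2]
      conv_rhs => rw [← List.take_append_drop mid L, fbSpec_append]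
      rw [htake]

lemma goA_eq_fbSpec (l : List Char) : ∀ (floor i : Int), 0 ≤ floor →
    calcFloorGoA l floor i true = (fbSpec l floor i).getD (floor + netOf l) := by
  induction l with
  | nil => intro floor i _; simp [calcFloorGoA, fbSpec, netOf]
  | cons c rest ih =>
    intro floor i hf
    by_cases h : c = ')'
    · by_cases hneg : floor - 1 < 0
      · have h2 : floor + -1 < 0 := by omega
        simp [calcFloorGoA, fbSpec, h, hneg, h2]
      · have h2 : ¬ floor + -1 < 0 := by omega
        have e : floor + -1 = floor - 1 := by ring
        simp [calcFloorGoA, fbSpec, h, hneg, h2, e, netOf_cons,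
              ih _ (i + 1) (by omega : (0:Int) ≤ floor - 1)]
        congr 1
        ring
    · have h2 : ¬ floor + 1 < 0 := by omega
      simp [calcFloorGoA, fbSpec, h, h2, netOf_cons,
            ih _ (i + 1) (by omega : (0:Int) ≤ floor + 1)]
      congr 1
      ring

lemma goA_false (l : List Char) : ∀ (floor i : Int),
    calcFloorGoA l floor i false = floor + netOf l := by
  induction l with
  | nil => intro floor i; simp [calcFloorGoA, netOf]
  | cons c rest ih =>
    intro floor i
    by_cases h : c = ')' <;> simp [calcFloorGoA, h, ih, netOf_cons, h] <;> ring

-- ===== VERDICT (by name: the statement is the Claim_ definition above) =====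
theorem calculate_floor_spec : Claim_equal_calculate_floor := by
  intro string part _
  unfold Spec_calculate_floor calculate_floor calculate_floor_alt
  cases part with
  | false => simpa using goA_false string.toList 0 0
  | true =>
    simp only [Bool.true_eq_false, if_false]
    rw [goA_eq_fbSpec string.toList 0 0 (le_refl 0),
        ← firstBasement_eq_fbSpec string.toList.length string.toList (le_refl _)]
    cases firstBasement string.toList 0 0 <;> simp
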